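-- pv_equiv track=rewrite | github.com/jinyoong/SWEA | problem/D3/1289. 원재의 메모리 복구하기.py | memory_restore
-- ===== SOURCE A (Python) =====
-- def memory_restore(bit_list):
--     """
--     :param bit_list: 0 비트를 해당 비트 리스트와 똑같이 만들어야 한다.
--     :return: 똑같이 만드는데 필요한 최소 횟수
--     먼저 1 과 0 값 중 하나를 선택해 어떠한 위치에 넣으면
--     그 값으로 그 뒤의 모든 비트가 변경된다
--     즉, 앞에서부터 변경하기 시작해보자
--     """
--     initial_list = [0] * len(bit_list)
--     change_ct = 0
--     for i in range(len(bit_list)):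
--         if initial_list[i] == bit_list[i]:
--             pass
--         else:
--             for j in range(i, len(bit_list)):
--                 initial_list[j] = bit_list[i]
--             change_ct += 1
--     return change_ct
-- ===== SOURCE B (Python) =====
-- def memory_restore(bit_list):
--     prev = 0
--     ct = 0
--     for b in bit_list:
--         if b != prev:
--             prev = b
--             ct += 1
--     return ct
-- ===== Notes on version B (the rewrite author's own statement) =====
-- stated objective: faster
-- what changed: Replaces the quadratic simulation (rewriting the whole suffix of a working list on every mismatch) by a single pass that counts transitions of the bit value from the previous one (starting at 0).
import Mathlib
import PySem

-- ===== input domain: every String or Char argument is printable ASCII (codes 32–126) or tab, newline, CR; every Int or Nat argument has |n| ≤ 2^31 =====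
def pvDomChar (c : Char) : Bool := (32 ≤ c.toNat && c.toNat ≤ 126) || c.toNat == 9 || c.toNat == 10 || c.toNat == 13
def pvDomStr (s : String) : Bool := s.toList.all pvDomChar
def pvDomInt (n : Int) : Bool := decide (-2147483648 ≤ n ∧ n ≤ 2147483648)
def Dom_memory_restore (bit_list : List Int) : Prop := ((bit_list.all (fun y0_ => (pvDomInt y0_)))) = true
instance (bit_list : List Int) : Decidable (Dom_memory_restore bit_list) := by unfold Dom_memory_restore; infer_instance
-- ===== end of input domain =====

-- B replaces A's quadratic suffix-rewriting simulation by a single linear pass counting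
-- transitions from the previous value (initially 0); objective: faster (asymptotic).

-- ===== PORT A =====
-- literal port of A: working list initial_list, outer index loop, inner loop rewriting the suffix
def memory_restore (bit_list : List Int) : Int :=
  let n : Int := (bit_list.length : Int)
  let st :=
    (PySem.List.pyRange 0 n 1).foldl
      (fun (st : List Int × Int) i =>
        if PySem.List.pyGetD st.1 i 0 = PySem.List.pyGetD bit_list i 0 then
          st
        else
          ((PySem.List.pyRange i n 1).foldl
              (fun il j => PySem.List.pySetD il j (PySem.List.pyGetD bit_list i 0)) st.1,
           st.2 + 1))
      (List.replicate bit_list.length (0 : Int), (0 : Int))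
  st.2

-- ===== PORT B =====
-- literal port of B: one fold carrying (prev, ct)
def memory_restore_alt (bit_list : List Int) : Int :=
  (bit_list.foldl
      (fun (st : Int × Int) b => if b ≠ st.1 then (b, st.2 + 1) else st)
      ((0 : Int), (0 : Int))).2

-- ===== PRECONDITION & SPEC =====
def Spec_memory_restore (bit_list : List Int) (out : Int) : Prop := out = memory_restore_alt bit_list
instance (bit_list : List Int) (out : Int) : Decidable (Spec_memory_restore bit_list out) := by unfold Spec_memory_restore; infer_instance

-- ===== CLAIM (what is proved, stated in full; the proofs are below) =====
def Claim_equal_memory_restore : Prop := ∀ (bit_list : List Int), Dom_memory_restore bit_list → Spec_memory_restore bit_list (memory_restore bit_list)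

-- ===== LEMMAS AND PROOFS =====

-- the inner loop of A: setting every position from a on to v turns the list into take a ++ replicate v
lemma setAll_eq (v : Int) (n : Nat) : ∀ (k a : Nat) (xs : List Int), n - a = k → xs.length = n → a ≤ n →
    (PySem.List.pyRange (a : Int) (n : Int) 1).foldl (fun il j => PySem.List.pySetD il j v) xs
      = xs.take a ++ List.replicate (n - a) v := by
  intro k
  induction k with
  | zero =>
    intro a xs hk hlen ha
    have han : a = n := by omega
    rw [PySem.List.pyRange_one_eq_nil (by exact_mod_cast le_of_eq han.symm)]
    simp [List.take_of_length_le, hlen, han]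
  | succ k ih =>
    intro a xs hk hlen ha
    have hlt : a < n := by omega
    rw [PySem.List.pyRange_one_cons (by exact_mod_cast hlt)]
    simp only [List.foldl_cons]
    have hc : ((a : Int) + 1) = ((a + 1 : Nat) : Int) := by push_cast; ring
    have hset : PySem.List.pySetD xs (a : Int) v = xs.set a v := by
      simp [PySem.List.pySetD_natCast]
    rw [hset, hc, ih (a + 1) (xs.set a v) (by omega) (by simp [hlen]) (by omega)]
    rw [List.set_eq_take_append_cons_drop]
    have hlt' : a < xs.length := by omega
    rw [if_pos hlt']
    have hlen' : (xs.take a).length = a := by simp; omega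
    have h1 : (xs.take a ++ v :: xs.drop (a + 1)).take (a + 1)
        = xs.take a ++ [v] := by
      rw [List.take_append, hlen']
      simp [List.take_of_length_le, hlt'.le]
    rw [h1]
    have h2 : List.replicate (n - a) v = v :: List.replicate (n - (a + 1)) v := by
      have : n - a = (n - (a + 1)) + 1 := by omega
      rw [this, List.replicate_succ]
    rw [h2, List.append_assoc]
    rfl

-- the outer loop of A agrees with B's fold, given the suffix of the working list is constant
lemma loop_eq (bl : List Int) : ∀ (k i : Nat) (cur ct : Int) (il : List Int),
    bl.length - i = k →
    il.length = bl.length →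
    il.drop i = List.replicate (bl.length - i) cur →
    ((PySem.List.pyRange (i : Int) (bl.length : Int) 1).foldl
        (fun (st : List Int × Int) i =>
          if PySem.List.pyGetD st.1 i 0 = PySem.List.pyGetD bl i 0 then st
          else
            ((PySem.List.pyRange i (bl.length : Int) 1).foldl
                (fun il j => PySem.List.pySetD il j (PySem.List.pyGetD bl i 0)) st.1,
             st.2 + 1))
        (il, ct)).2
      = ((bl.drop i).foldl
          (fun (st : Int × Int) b => if b ≠ st.1 then (b, st.2 + 1) else st) (cur, ct)).2 := by
  intro k
  induction k with
  | zero =>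
    intro i cur ct il hk hlen hdrop
    rw [PySem.List.pyRange_one_eq_nil (by exact_mod_cast (by omega : bl.length ≤ i)),
        List.drop_eq_nil_of_le (by omega)]
    rfl
  | succ k ih =>
    intro i cur ct il hk hlen hdrop
    have hlt : i < bl.length := by omega
    have hilt : i < il.length := by omega
    rw [PySem.List.pyRange_one_cons (by exact_mod_cast hlt), List.foldl_cons,
        List.drop_eq_getElem_cons hlt, List.foldl_cons]
    have hgil : PySem.List.pyGetD il (i : Int) 0 = cur := by
      rw [PySem.List.pyGetD_natCast]
      have h0 : il[i] = (il.drop i)[0]'(by simp; omega) := by simp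
      rw [List.getD_eq_getElem _ _ hilt, h0]
      simp [hdrop]
    have hgbl : PySem.List.pyGetD bl (i : Int) 0 = bl[i] := by
      rw [PySem.List.pyGetD_natCast, List.getD_eq_getElem _ _ hlt]
    have hc : ((i : Int) + 1) = ((i + 1 : Nat) : Int) := by push_cast; ring
    rw [hgil, hgbl]
    by_cases hcase : cur = bl[i]
    · rw [if_pos hcase, if_neg (by simp [hcase])]
      rw [hc]
      exact ih (i + 1) cur ct il (by omega) hlen
        (by rw [← List.drop_drop, hdrop]
            have : bl.length - i = (bl.length - (i + 1)) + 1 := by omega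
            rw [this, List.replicate_succ, List.drop_one, List.tail_cons])
    · rw [if_neg hcase, if_pos (by simp; exact fun h => hcase h.symm)]
      rw [setAll_eq bl[i] bl.length (bl.length - i) i il rfl hlen (by omega)]
      rw [hc]
      exact ih (i + 1) bl[i] (ct + 1) _ (by omega)
        (by simp; omega)
        (by have hlt2 : (List.take i il).length = i := by simp; omega
            rw [List.drop_append, hlt2, List.drop_replicate,
                List.drop_eq_nil_of_le (by rw [hlt2]; omega), List.nil_append]
            congr 1
            omega)

-- ===== VERDICT (by name: the statement is the Claim_ definition above) =====
theorem memory_restore_spec : Claim_equal_memory_restore := by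
  intro bl _
  unfold Spec_memory_restore memory_restore memory_restore_alt
  have h := loop_eq bl bl.length 0 0 0 (List.replicate bl.length (0 : Int))
    (by omega) (by simp) (by simp)
  simpa using h
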